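-- pv_equiv track=rewrite | github.com/aepaysinger/code-challenges | code_challenges/hacker_rank/itertools_combinations.py | making_combinations
-- ===== SOURCE A (Python) =====
-- from itertools import combinations
--
-- def making_combinations(a_string, a_number):
--     list_a_string = list(a_string)
--     list_a_string = sorted(list_a_string, key=str.lower)
--     final_combinations = []
--     for count in range(1, a_number + 1):
--         combinations_with_count = list(combinations(list_a_string, count))
--         for groups in combinations_with_count:
--             final_combinations.append("".join(groups))
--     return "\n".join(final_combinations)
-- ===== SOURCE B (Python) =====
-- def making_combinations(a_string, a_number):
--     chars = sorted(list(a_string), key=str.lower)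
--     length = len(chars)
--     out = []
--     layer = [("", 0)]  # (combination built so far, smallest index still allowed)
--     for _ in range(1, a_number + 1):
--         layer = [(s + chars[j], j + 1) for s, start in layer for j in range(start, length)]
--         out.extend(s for s, _ in layer)
--     return "\n".join(out)
-- ===== Notes on version B (the rewrite author's own statement) =====
-- stated objective: alternative
-- what changed: Replaces the per-size itertools.combinations library calls with a single breadth-first layering pass: each layer of (partial combination, next allowed index) pairs is extended by one character from the previous layer, so no library enumerator and no per-size restart.
import Mathlib
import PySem

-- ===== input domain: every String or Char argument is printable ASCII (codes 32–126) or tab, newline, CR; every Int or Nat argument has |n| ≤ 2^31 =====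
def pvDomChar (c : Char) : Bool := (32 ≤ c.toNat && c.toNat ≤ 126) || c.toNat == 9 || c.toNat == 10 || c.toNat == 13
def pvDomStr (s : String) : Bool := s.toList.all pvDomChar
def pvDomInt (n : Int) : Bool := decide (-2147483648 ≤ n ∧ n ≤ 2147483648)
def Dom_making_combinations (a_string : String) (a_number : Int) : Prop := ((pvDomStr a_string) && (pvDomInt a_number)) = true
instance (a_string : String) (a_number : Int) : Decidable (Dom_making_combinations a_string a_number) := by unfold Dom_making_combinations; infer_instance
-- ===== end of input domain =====

-- B replaces the per-size itertools.combinations calls by one breadth-first layering pass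
-- over (partial combination, next allowed index) pairs (objective: alternative, same cost).

-- ===== PORT A =====
-- itertools.combinations(l, k) in its exact emission order (prefix-extending recursion);
-- each combination is kept as its List Char (a "".join of one-char strings is that char list).
def pvCombosA : List Char → Nat → List (List Char)
  | _, 0 => [[]]
  | [], _ + 1 => []
  | x :: xs, k + 1 => ((pvCombosA xs k).map (fun g => x :: g)) ++ pvCombosA xs (k + 1)

def making_combinations (a_string : String) (a_number : Int) : String :=
  let list_a_string := PySem.List.sorted a_string.toList (fun c => PySem.Chars.lowerChar c) false
  let final_combinations :=
    (PySem.List.pyRange 1 (a_number + 1) 1).foldl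
      (fun acc count => acc ++ pvCombosA list_a_string count.toNat) []
  String.mk (PySem.Chars.join ['\n'] final_combinations)

-- ===== PORT B =====
-- Source B's layer update: each (s, start) is extended by chars[j] for j in range(start, length).
def pvLayerStep (chars : List Char) (layer : List (List Char × Nat)) : List (List Char × Nat) :=
  layer.flatMap (fun p =>
    (List.range' p.2 (chars.length - p.2)).map (fun j => (p.1 ++ [chars.getD j ' '], j + 1)))

def making_combinations_alt (a_string : String) (a_number : Int) : String :=
  let chars := PySem.List.sorted a_string.toList (fun c => PySem.Chars.lowerChar c) false
  let res :=
    (PySem.List.pyRange 1 (a_number + 1) 1).foldl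
      (fun st _ =>
        let nxt := pvLayerStep chars st.2
        (st.1 ++ nxt.map Prod.fst, nxt))
      (([] : List (List Char)), ([([], 0)] : List (List Char × Nat)))
  String.mk (PySem.Chars.join ['\n'] res.1)

-- ===== PRECONDITION & SPEC =====
def Spec_making_combinations (a_string : String) (a_number : Int) (out : String) : Prop := out = making_combinations_alt a_string a_number
instance (a_string : String) (a_number : Int) (out : String) : Decidable (Spec_making_combinations a_string a_number out) := by unfold Spec_making_combinations; infer_instance

-- ===== CLAIM =====
def Claim_equal_making_combinations : Prop := ∀ (a_string : String) (a_number : Int), Dom_making_combinations a_string a_number → Spec_making_combinations a_string a_number (making_combinations a_string a_number)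

-- ===== LEMMAS AND PROOFS =====

-- k-combinations of the suffix of `chars` starting at `off`, paired with next-allowed index.
def pvC2 : List Char → Nat → Nat → List (List Char × Nat)
  | _, off, 0 => [([], off)]
  | [], _, _ + 1 => []
  | x :: xs, off, k + 1 =>
      ((pvC2 xs (off + 1) k).map (fun p => (x :: p.1, p.2))) ++ pvC2 xs (off + 1) (k + 1)

theorem pvC2_fst : ∀ (cs : List Char) (off k : Nat), (pvC2 cs off k).map Prod.fst = pvCombosA cs k := by
  intro cs
  induction cs with
  | nil => intro off k; cases k <;> rfl
  | cons x xs ih =>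
      intro off k
      cases k with
      | zero => rfl
      | succ k =>
          rw [pvC2, pvCombosA]
          simp only [List.map_append, List.map_map, ih]
          congr 1
          rw [← ih (off + 1) k]
          simp [Function.comp_def]

theorem pvLayerStep_append (chars : List Char) (l1 l2 : List (List Char × Nat)) :
    pvLayerStep chars (l1 ++ l2) = pvLayerStep chars l1 ++ pvLayerStep chars l2 := by
  simp [pvLayerStep]

theorem pvLayerStep_consMap (chars : List Char) (x : Char) (l : List (List Char × Nat)) :
    pvLayerStep chars (l.map (fun p => (x :: p.1, p.2)))
      = (pvLayerStep chars l).map (fun p => (x :: p.1, p.2)) := by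
  simp [pvLayerStep, List.flatMap_map, List.map_flatMap, List.map_map, Function.comp_def]

theorem pvLayerStep_C2 (chars : List Char) :
    ∀ (cs : List Char) (off k : Nat), chars.drop off = cs →
      pvLayerStep chars (pvC2 cs off k) = pvC2 cs off (k + 1) := by
  intro cs
  induction cs with
  | nil =>
      intro off k hoff
      have hlen : chars.length ≤ off := by
        have := congrArg List.length hoff; simp at this; omega
      cases k with
      | zero =>
          simp [pvC2, pvLayerStep, Nat.sub_eq_zero_of_le hlen]
      | succ k => simp [pvC2, pvLayerStep]
  | cons x xs ih =>
      intro off k hoff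
      have hofflt : off < chars.length := by
        have := congrArg List.length hoff; simp at this; omega
      have hx : chars[off]? = some x := by
        have h0 : (chars.drop off)[0]? = some x := by rw [hoff]; rfl
        rwa [List.getElem?_drop, Nat.add_zero] at h0
      have hxs : chars.drop (off + 1) = xs := by
        have h1 : (chars.drop off).drop 1 = xs := by rw [hoff]; rfl
        rwa [List.drop_drop] at h1
      have hcount : chars.length - off = (chars.length - (off + 1)) + 1 := by omega
      cases k with
      | zero =>
          rw [pvC2, pvLayerStep]
          rw [show pvC2 (x :: xs) off 1
                = ((pvC2 xs (off + 1) 0).map (fun p => (x :: p.1, p.2))) ++ pvC2 xs (off + 1) 1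
              from rfl]
          rw [← ih (off + 1) 0 hxs]
          simp only [List.flatMap_cons, List.flatMap_nil, List.append_nil]
          rw [hcount, List.range'_succ]
          simp [pvLayerStep, pvC2, hx]
      | succ k =>
          rw [pvC2, pvLayerStep_append, pvLayerStep_consMap,
              ih (off + 1) k hxs, ih (off + 1) (k + 1) hxs]
          rfl

-- B's fold, started from the k-th layer, emits exactly the layers k+1, k+2, … .
theorem pvFoldB (chars : List Char) :
    ∀ (l : List Int) (out : List (List Char)) (k : Nat),
      (l.foldl
        (fun st _ => (st.1 ++ (pvLayerStep chars st.2).map Prod.fst, pvLayerStep chars st.2))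
        (out, pvC2 chars 0 k)).1
      = out ++ (List.range l.length).flatMap (fun i => pvCombosA chars (k + 1 + i)) := by
  intro l
  induction l with
  | nil => intro out k; simp
  | cons x l ih =>
      intro out k
      have hstep : pvLayerStep chars (pvC2 chars 0 k) = pvC2 chars 0 (k + 1) :=
        pvLayerStep_C2 chars chars 0 k (by simp)
      simp only [List.foldl_cons, hstep]
      rw [ih (out ++ (pvC2 chars 0 (k + 1)).map Prod.fst) (k + 1)]
      rw [List.length_cons, List.range_succ_eq_map]
      simp only [List.flatMap_cons, List.flatMap_map, List.append_assoc, pvC2_fst]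
      congr 2
      congr 1
      funext i
      congr 1
      omega

-- ===== VERDICT =====
theorem making_combinations_spec : Claim_equal_making_combinations := by
  intro a_string a_number _
  unfold Spec_making_combinations making_combinations making_combinations_alt
  simp only [PySem.List.foldl_append_eq_flatMap, List.nil_append]
  set chars := PySem.List.sorted a_string.toList (fun c => PySem.Chars.lowerChar c) false with hchars
  rw [show ([([], 0)] : List (List Char × Nat)) = pvC2 chars 0 0 from by cases chars <;> rfl]
  rw [pvFoldB chars]
  rw [PySem.List.length_pyRange_one, PySem.List.pyRange_one, List.flatMap_map, List.nil_append]
  congr 1
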